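-- pv_equiv track=rewrite | github.com/aryantandon01/hardware-ai-orchestrator-simplified | src/vision/schematic_processor/integration_handler.py | _check_design_completeness
-- ===== SOURCE A (Python) =====
-- from typing import Dict, Any, List, Optional
--
-- def _check_design_completeness(components: List[Dict]) -> Dict[str, Any]:
--     """Check overall design completeness"""
--     warnings = []
--     recommendations = []
--
--     component_types = [c.get('component_type', '') for c in components]
--
--     # Check for power supply components
--     if 'voltage_source' not in component_types:
--         warnings.append("No power source detected in schematic")
--         recommendations.append("Add power supply specifications and connections")
--
--     # Check for ground connections
--     if 'ground' not in component_types: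
--         warnings.append("No ground reference detected in schematic")
--         recommendations.append("Ensure proper ground symbol placement for reference")
--
--     # Check for test points
--     test_point_indicators = ['TP', 'TEST', 'PROBE']
--     has_test_points = any(
--         any(indicator in str(c.get('designation', '')).upper() for indicator in test_point_indicators)
--         for c in components
--     )
--
--     if not has_test_points:
--         recommendations.append("Consider adding test points for debugging and validation")
--
--     return {
--         'warnings': warnings,
--         'recommendations': recommendations
--     }
-- ===== SOURCE B (Python) =====
-- from typing import Dict, Any, List
--
-- _TEST_POINT_INDICATORS = ('TP', 'TEST', 'PROBE')
--
-- # Declarative rules: capability tag -> (warning or None, recommendation) when missing.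
-- _RULES = [
--     ('power', "No power source detected in schematic",
--      "Add power supply specifications and connections"),
--     ('ground', "No ground reference detected in schematic",
--      "Ensure proper ground symbol placement for reference"),
--     ('test_point', None,
--      "Consider adding test points for debugging and validation"),
-- ]
--
-- def _classify(c: Dict) -> set:
--     """Capability tags contributed by one component."""
--     tags = set()
--     t = c.get('component_type', '')
--     if t == 'voltage_source':
--         tags.add('power')
--     if t == 'ground':
--         tags.add('ground')
--     d = str(c.get('designation', '')).upper()
--     if any(ind in d for ind in _TEST_POINT_INDICATORS):
--         tags.add('test_point')
--     return tags
--
-- def _check_design_completeness(components: List[Dict]) -> Dict[str, Any]: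
--     """Check overall design completeness via a capability set and a rules table."""
--     present = set()
--     for c in components:
--         present |= _classify(c)
--     warnings = []
--     recommendations = []
--     for tag, warn, rec in _RULES:
--         if tag not in present:
--             if warn is not None:
--                 warnings.append(warn)
--             recommendations.append(rec)
--     return {'warnings': warnings, 'recommendations': recommendations}
-- ===== Notes on version B (the rewrite author's own statement) =====
-- stated objective: alternative
-- what changed: Replaces the three hard-coded traversals with a classifier that maps each component to a set of capability tags, unions those sets into one 'present' set, and then emits warnings/recommendations by iterating a declarative rules table of (tag, optional warning, recommendation).
import Mathlib
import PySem

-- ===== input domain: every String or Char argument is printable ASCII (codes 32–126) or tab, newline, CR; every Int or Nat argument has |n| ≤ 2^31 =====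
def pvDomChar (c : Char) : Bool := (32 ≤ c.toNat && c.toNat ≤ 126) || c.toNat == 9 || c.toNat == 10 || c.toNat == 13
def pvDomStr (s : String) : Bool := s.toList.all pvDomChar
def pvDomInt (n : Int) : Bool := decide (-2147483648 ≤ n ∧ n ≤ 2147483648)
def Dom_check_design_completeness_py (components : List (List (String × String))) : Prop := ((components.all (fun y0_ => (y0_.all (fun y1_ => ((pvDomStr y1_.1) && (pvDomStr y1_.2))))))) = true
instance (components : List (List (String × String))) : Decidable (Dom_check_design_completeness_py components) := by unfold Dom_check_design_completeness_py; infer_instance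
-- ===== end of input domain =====

-- One honest line: B replaces A's three hard-coded scans by a per-component capability
-- classifier whose tag sets are unioned, then a declarative rules table emits the
-- warnings/recommendations for missing tags; alternative decomposition, same cost.

-- dict.get(k, dflt) on an association list: first match, else the default (shared by both ports)
def pvGetD (c : List (String × String)) (k dflt : String) : String :=
  match c.find? (fun kv => kv.1 == k) with
  | some kv => kv.2
  | none => dflt

-- ===== PORT A =====
def check_design_completeness_py (components : List (List (String × String))) : List (String × List String) :=
  let warnings : List String := []
  let recommendations : List String := []
  let component_types := components.map (fun c => pvGetD c "component_type" "")
  let (warnings, recommendations) :=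
    if ¬ component_types.contains "voltage_source" then
      (warnings ++ ["No power source detected in schematic"],
       recommendations ++ ["Add power supply specifications and connections"])
    else (warnings, recommendations)
  let (warnings, recommendations) :=
    if ¬ component_types.contains "ground" then
      (warnings ++ ["No ground reference detected in schematic"],
       recommendations ++ ["Ensure proper ground symbol placement for reference"])
    else (warnings, recommendations)
  let test_point_indicators := ["TP", "TEST", "PROBE"]
  let has_test_points := components.any (fun c =>
    test_point_indicators.any (fun ind => PySem.Str.isIn ind (PySem.Str.upper (pvGetD c "designation" ""))))
  let recommendations :=
    if ¬ has_test_points then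
      recommendations ++ ["Consider adding test points for debugging and validation"]
    else recommendations
  [("warnings", warnings), ("recommendations", recommendations)]

-- ===== PORT B =====
-- declarative rules table: (tag, optional warning, recommendation) when the tag is missing
def pvRules : List (String × Option String × String) :=
  [("power", some "No power source detected in schematic",
    "Add power supply specifications and connections"),
   ("ground", some "No ground reference detected in schematic",
    "Ensure proper ground symbol placement for reference"),
   ("test_point", none,
    "Consider adding test points for debugging and validation")]

-- capability tags contributed by one component (a Python set)
def pvClassify (c : List (String × String)) : PySem.Set String :=
  let tags : PySem.Set String := PySem.Set.empty
  let t := pvGetD c "component_type" ""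
  let tags := if t == "voltage_source" then PySem.Set.add tags "power" else tags
  let tags := if t == "ground" then PySem.Set.add tags "ground" else tags
  let d := PySem.Str.upper (pvGetD c "designation" "")
  let tags := if (["TP", "TEST", "PROBE"] : List String).any (fun ind => PySem.Str.isIn ind d)
    then PySem.Set.add tags "test_point" else tags
  tags

def check_design_completeness_py_alt (components : List (List (String × String))) : List (String × List String) :=
  let present := components.foldl (fun s c => PySem.Set.union s (pvClassify c)) PySem.Set.empty
  let wr := pvRules.foldl (fun (wr : List String × List String) rule =>
    if ¬ PySem.Set.contains present rule.1 then
      (match rule.2.1 with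
       | some w => wr.1 ++ [w]
       | none => wr.1,
       wr.2 ++ [rule.2.2])
    else wr) ([], [])
  [("warnings", wr.1), ("recommendations", wr.2)]

-- ===== PRECONDITION & SPEC =====
def Spec_check_design_completeness_py (components : List (List (String × String))) (out : List (String × List String)) : Prop := out = check_design_completeness_py_alt components
instance (components : List (List (String × String))) (out : List (String × List String)) : Decidable (Spec_check_design_completeness_py components out) := by unfold Spec_check_design_completeness_py; infer_instance

-- ===== CLAIM (what is proved, stated in full; the proofs are below) =====
def Claim_equal_check_design_completeness_py : Prop := ∀ (components : List (List (String × String))), Dom_check_design_completeness_py components → Spec_check_design_completeness_py components (check_design_completeness_py components)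

-- ===== LEMMAS AND PROOFS =====

-- membership in the folded union of classifications = some component contributes the tag
theorem pvMem_present (components : List (List (String × String))) (s : PySem.Set String) (x : String) :
    PySem.Set.contains (components.foldl (fun s c => PySem.Set.union s (pvClassify c)) s) x
    = (PySem.Set.contains s x || components.any (fun c => PySem.Set.contains (pvClassify c) x)) := by
  induction components generalizing s with
  | nil => simp
  | cons c cs ih =>
    simp only [List.foldl_cons, List.any_cons, ih]
    simp [Bool.or_assoc]

theorem pvClassify_power (c : List (String × String)) :
    PySem.Set.contains (pvClassify c) "power" = (pvGetD c "component_type" "" == "voltage_source") := by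
  by_cases h1 : pvGetD c "component_type" "" == "voltage_source" <;>
  by_cases h2 : pvGetD c "component_type" "" == "ground" <;>
  by_cases h3 : (["TP", "TEST", "PROBE"] : List String).any
      (fun ind => PySem.Str.isIn ind (PySem.Str.upper (pvGetD c "designation" ""))) <;>
  simp_all [pvClassify, PySem.Set.add, PySem.Set.contains, PySem.Set.empty]

theorem pvClassify_ground (c : List (String × String)) :
    PySem.Set.contains (pvClassify c) "ground" = (pvGetD c "component_type" "" == "ground") := by
  by_cases h1 : pvGetD c "component_type" "" == "voltage_source" <;>
  by_cases h2 : pvGetD c "component_type" "" == "ground" <;>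
  by_cases h3 : (["TP", "TEST", "PROBE"] : List String).any
      (fun ind => PySem.Str.isIn ind (PySem.Str.upper (pvGetD c "designation" ""))) <;>
  simp_all [pvClassify, PySem.Set.add, PySem.Set.contains, PySem.Set.empty]

theorem pvClassify_tp (c : List (String × String)) :
    PySem.Set.contains (pvClassify c) "test_point"
    = (["TP", "TEST", "PROBE"] : List String).any
        (fun ind => PySem.Str.isIn ind (PySem.Str.upper (pvGetD c "designation" ""))) := by
  by_cases h1 : pvGetD c "component_type" "" == "voltage_source" <;>
  by_cases h2 : pvGetD c "component_type" "" == "ground" <;>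
  by_cases h3 : (["TP", "TEST", "PROBE"] : List String).any
      (fun ind => PySem.Str.isIn ind (PySem.Str.upper (pvGetD c "designation" ""))) <;>
  simp_all [pvClassify, PySem.Set.add, PySem.Set.contains, PySem.Set.empty]

-- A's membership test over the mapped type list, as an any over components
theorem pvContains_map (components : List (List (String × String))) (t : String) :
    (components.map (fun c => pvGetD c "component_type" "")).contains t
    = components.any (fun c => pvGetD c "component_type" "" == t) := by
  induction components with
  | nil => rfl
  | cons c cs ih =>
    simp only [List.map_cons, List.contains_cons, List.any_cons, ih]
    simp [BEq.comm]

-- ===== VERDICT (by name: the statement is the Claim_ definition above) =====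
theorem check_design_completeness_py_spec : Claim_equal_check_design_completeness_py := by
  intro components _
  unfold Spec_check_design_completeness_py
  simp only [check_design_completeness_py, check_design_completeness_py_alt, pvRules,
    List.foldl_cons, List.foldl_nil, pvMem_present, pvClassify_power, pvClassify_ground,
    pvClassify_tp, pvContains_map]
  generalize components.any (fun c => pvGetD c "component_type" "" == "voltage_source") = bv
  generalize components.any (fun c => pvGetD c "component_type" "" == "ground") = bg
  generalize (components.any (fun c =>
      (["TP", "TEST", "PROBE"] : List String).any
        (fun ind => PySem.Str.isIn ind (PySem.Str.upper (pvGetD c "designation" ""))))) = bt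
  cases bv <;> cases bg <;> cases bt <;> simp [PySem.Set.contains, PySem.Set.empty]
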